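-- pv_equiv track=rewrite | github.com/byteAziz/Simple-Type-Analizer | hm.py | fromBasicToOutputFormat
-- ===== SOURCE A (Python) =====
-- def fromBasicToOutputFormat(type_expr: str) -> str:
--     types = list(type_expr)
--     if len(types) == 1:
--         return f'{type_expr}'
--
--     result = types[-1]
--     for part in reversed(types[:-1]):
--         result = f'({part} -> {result})'
--     return result
-- ===== SOURCE B (Python) =====
-- def fromBasicToOutputFormat(type_expr: str) -> str:
--     # closed form: "(c0 -> (c1 -> ... cn-1" prefixes, last char, then n-1 closing parens
--     opens = ''.join(f'({c} -> ' for c in type_expr[:-1])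
--     return opens + type_expr[-1] + ')' * (len(type_expr) - 1)
-- ===== Notes on version B (the rewrite author's own statement) =====
-- stated objective: faster
-- what changed: B computes the nested arrow string in closed form: a join of per-character open-paren/arrow prefixes, the last character, and n-1 closing parens, instead of A's back-to-front accumulator loop that rebuilds the whole string each step.
import Mathlib
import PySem

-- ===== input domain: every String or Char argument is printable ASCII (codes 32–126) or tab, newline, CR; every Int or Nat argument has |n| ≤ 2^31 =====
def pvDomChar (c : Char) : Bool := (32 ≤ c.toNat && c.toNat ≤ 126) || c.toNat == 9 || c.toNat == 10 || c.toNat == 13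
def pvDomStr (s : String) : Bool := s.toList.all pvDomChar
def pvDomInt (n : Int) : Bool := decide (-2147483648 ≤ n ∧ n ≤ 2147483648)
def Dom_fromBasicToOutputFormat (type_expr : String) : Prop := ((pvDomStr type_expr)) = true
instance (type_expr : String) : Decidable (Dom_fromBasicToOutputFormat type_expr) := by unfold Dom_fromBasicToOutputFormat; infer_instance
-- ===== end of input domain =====

-- B builds the nested arrow string in closed form (prefixes + last char + repeated ')') instead of A's accumulator loop; return value only.
-- ===== PORT A =====
def fromBasicToOutputFormat (type_expr : String) : String :=
  let types := type_expr.toList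
  if types.length == 1 then type_expr
  else
    match PySem.List.pyGet? types (-1) with
    | none => ""   -- IndexError on the empty string; excluded by Pre_
    | some last =>
      ((PySem.List.slice types none (some (-1))).reverse).foldl
        (fun result part => "(" ++ String.ofList [part] ++ " -> " ++ result ++ ")")
        (String.ofList [last])

-- ===== PORT B =====
def fromBasicToOutputFormat_alt (type_expr : String) : String :=
  let l := type_expr.toList
  match PySem.List.pyGet? l (-1) with
  | none => ""   -- IndexError on the empty string; excluded by Pre_
  | some last =>
    String.ofList (l.dropLast.flatMap (fun c => '(' :: c :: (" -> ".toList)))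
      ++ String.ofList [last]
      ++ String.ofList (List.replicate (l.length - 1) ')')

-- ===== PRECONDITION & SPEC =====
-- Pre_ excludes only the empty string, on which A (and B) raise IndexError.
def Pre_fromBasicToOutputFormat (type_expr : String) : Prop := type_expr ≠ ""
instance (type_expr : String) : Decidable (Pre_fromBasicToOutputFormat type_expr) := by unfold Pre_fromBasicToOutputFormat; infer_instance
def pvWitness_fromBasicToOutputFormat : String := "ab"

def Spec_fromBasicToOutputFormat (type_expr : String) (out : String) : Prop := out = fromBasicToOutputFormat_alt type_expr
instance (type_expr : String) (out : String) : Decidable (Spec_fromBasicToOutputFormat type_expr out) := by unfold Spec_fromBasicToOutputFormat; infer_instance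

-- ===== CLAIM (what is proved, stated in full; the proofs are below) =====
def Claim_equal_fromBasicToOutputFormat : Prop := ∀ (type_expr : String), Dom_fromBasicToOutputFormat type_expr → Pre_fromBasicToOutputFormat type_expr → Spec_fromBasicToOutputFormat type_expr (fromBasicToOutputFormat type_expr)

-- ===== LEMMAS AND PROOFS =====
-- A's right fold over the leading characters equals B's closed form around the same base string.
theorem foldr_wrap_closed (l : List Char) (b : String) :
    l.foldr (fun part result => "(" ++ String.ofList [part] ++ " -> " ++ result ++ ")") b
      = String.ofList (l.flatMap (fun c => '(' :: c :: (" -> ".toList)))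
          ++ b ++ String.ofList (List.replicate l.length ')') := by
  induction l with
  | nil =>
    apply String.toList_injective
    simp
  | cons a l ih =>
    simp only [List.foldr_cons, ih]
    apply String.toList_injective
    simp [List.replicate_succ']

-- ===== VERDICT (by name: the statement is the Claim_ definition above) =====
theorem fromBasicToOutputFormat_spec : Claim_equal_fromBasicToOutputFormat := by
  intro s _ hpre
  unfold Spec_fromBasicToOutputFormat fromBasicToOutputFormat fromBasicToOutputFormat_alt
  have hne : s.toList ≠ [] := by
    intro h
    apply hpre
    calc s = String.ofList s.toList := (String.ofList_toList).symm
    _ = "" := by rw [h]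
  simp only []
  rw [PySem.List.pyGet?_neg_one, List.getLast?_eq_some_getLast hne]
  by_cases h1 : s.toList.length == 1
  · simp only [h1, if_true]
    obtain ⟨c, hc⟩ : ∃ c, s.toList = [c] := by
      cases hl : s.toList with
      | nil => exact absurd hl hne
      | cons a t =>
        cases t with
        | nil => exact ⟨a, rfl⟩
        | cons b t' => simp [hl] at h1
    apply String.toList_injective
    simp [hc]
  · simp only [h1]
    rw [PySem.List.slice_to_neg_one, List.foldl_reverse]
    rw [foldr_wrap_closed]
    rw [List.length_dropLast]
    simp
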